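-- pv_equiv track=rewrite | github.com/thangnguyen021203/ToolSnapshot2Excel | utils_dk.py | group_and_sort_cells_by_row
-- ===== SOURCE A (Python) =====
-- def group_and_sort_cells_by_row(cells, results, row_threshold=20):
--     """
--     Nhóm các cells thành các hàng, liên kết với results và sắp xếp từng hàng theo trục x.
--
--     Args:
--         cells: Danh sách các tọa độ ô (x, y, w, h).
--         results: Danh sách kết quả OCR theo thứ tự.
--         row_threshold: Ngưỡng khoảng cách y để coi các ô thuộc cùng một hàng.
--
--     Returns:
--         List[List[Tuple, str]]: Danh sách các hàng với các cells và giá trị OCR được sắp xếp.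
--     """
--     # Bước 1: Sắp xếp cells và liên kết với results
--     cells_with_results = sorted(
--         zip(cells, results), key=lambda c: (c[0][1], c[0][0])
--     )  # Sắp xếp theo y trước, x sau
--
--     rows = []
--     current_row = []
--
--     for (cell, result) in cells_with_results:
--         x, y, w, h = cell  # Giải nén cell
--         if not current_row:
--             current_row.append((cell, result))
--         else:
--             # Lấy tọa độ y của ô cuối cùng trong hàng hiện tại
--             last_cell, _ = current_row[-1]
--             _, last_y, _, last_h = last_cell
--             if abs(y - last_y) < row_threshold:
--                 current_row.append((cell, result))
--             else:
--                 # Thêm hàng cũ vào danh sách và tạo hàng mới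
--                 rows.append(current_row)
--                 current_row = [(cell, result)]
--
--     # Thêm hàng cuối cùng
--     if current_row:
--         rows.append(current_row)
--
--     # Bước 2: Sắp xếp từng hàng theo tọa độ x
--     for row in rows:
--         row.sort(key=lambda c: c[0][0])  # Sắp xếp theo x
--
--     return rows
-- ===== SOURCE B (Python) =====
-- def group_and_sort_cells_by_row(cells, results, row_threshold=20):
--     # Build rows back-to-front over the reversed sorted list: no current-row
--     # buffer and no final flush step.
--     items = sorted(zip(cells, results), key=lambda c: (c[0][1], c[0][0]))
--     rows = []
--     for item in reversed(items):
--         if rows and abs(rows[0][0][0][1] - item[0][1]) < row_threshold: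
--             rows[0] = [item] + rows[0]
--         else:
--             rows = [[item]] + rows
--     return [sorted(row, key=lambda c: c[0][0]) for row in rows]
-- ===== Notes on version B (the rewrite author's own statement) =====
-- stated objective: alternative
-- what changed: Replaces A's forward grow-a-current-row-then-flush loop with a single reverse traversal of the sorted list that builds the row list back-to-front (prepend into the first row when adjacent y's are close, else cons a new row), eliminating the current-row buffer and the final flush.
import Mathlib
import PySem

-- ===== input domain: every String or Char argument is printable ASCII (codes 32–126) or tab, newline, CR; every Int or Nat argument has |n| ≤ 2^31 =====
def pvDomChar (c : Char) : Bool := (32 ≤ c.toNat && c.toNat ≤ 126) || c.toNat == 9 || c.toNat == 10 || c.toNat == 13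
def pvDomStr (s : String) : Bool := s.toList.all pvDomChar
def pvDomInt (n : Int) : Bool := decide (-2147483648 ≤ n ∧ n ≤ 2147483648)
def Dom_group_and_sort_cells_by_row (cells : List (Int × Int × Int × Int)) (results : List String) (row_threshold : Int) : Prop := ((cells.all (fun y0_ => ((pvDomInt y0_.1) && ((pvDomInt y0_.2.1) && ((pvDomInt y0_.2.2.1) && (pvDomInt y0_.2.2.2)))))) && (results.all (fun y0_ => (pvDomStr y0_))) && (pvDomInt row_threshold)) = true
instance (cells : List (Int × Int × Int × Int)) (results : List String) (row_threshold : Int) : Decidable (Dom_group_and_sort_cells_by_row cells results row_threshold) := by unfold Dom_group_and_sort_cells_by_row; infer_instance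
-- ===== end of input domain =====

-- B replaces A's forward grow-current-row-then-flush loop by one reverse traversal
-- building the row list back-to-front (objective: alternative decomposition, same cost).

abbrev PvCell := (Int × Int × Int × Int) × String

-- ===== PORT A =====
-- the body of A's for-loop (state = (rows, current_row)); current_row[-1] via getLast?
def pvStepA (thr : Int) (s : List (List PvCell) × List PvCell) (cr : PvCell) :
    List (List PvCell) × List PvCell :=
  match s.2.getLast? with
  | none => (s.1, s.2 ++ [cr])            -- `if not current_row`
  | some last =>
      if |cr.1.2.1 - last.1.2.1| < thr then (s.1, s.2 ++ [cr])
      else (s.1 ++ [s.2], [cr])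

def group_and_sort_cells_by_row (cells : List (Int × Int × Int × Int)) (results : List String) (row_threshold : Int) : List (List ((Int × Int × Int × Int) × String)) :=
  let cells_with_results := PySem.List.sorted2 (cells.zip results) (fun c => c.1.2.1) (fun c => c.1.1)
  let st := cells_with_results.foldl (pvStepA row_threshold) ([], [])
  let rows := if st.2 = [] then st.1 else st.1 ++ [st.2]   -- final `if current_row`
  rows.map (fun row => PySem.List.sorted row (fun c => c.1.1))

-- ===== PORT B =====
-- the body of B's for-loop over reversed(items): prepend into the first row or start one
def pvStepB (thr : Int) (item : PvCell) (rows : List (List PvCell)) : List (List PvCell) :=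
  match rows with
  | (b :: r) :: rs =>
      if |b.1.2.1 - item.1.2.1| < thr then (item :: b :: r) :: rs
      else [item] :: (b :: r) :: rs
  | _ => [item] :: rows

def group_and_sort_cells_by_row_alt (cells : List (Int × Int × Int × Int)) (results : List String) (row_threshold : Int) : List (List ((Int × Int × Int × Int) × String)) :=
  let items := PySem.List.sorted2 (cells.zip results) (fun c => c.1.2.1) (fun c => c.1.1)
  let rows := items.reverse.foldl (fun rows item => pvStepB row_threshold item rows) []
  rows.map (fun row => PySem.List.sorted row (fun c => c.1.1))

-- ===== PRECONDITION & SPEC =====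
def Spec_group_and_sort_cells_by_row (cells : List (Int × Int × Int × Int)) (results : List String) (row_threshold : Int) (out : List (List ((Int × Int × Int × Int) × String))) : Prop := out = group_and_sort_cells_by_row_alt cells results row_threshold
instance (cells : List (Int × Int × Int × Int)) (results : List String) (row_threshold : Int) (out : List (List ((Int × Int × Int × Int) × String))) : Decidable (Spec_group_and_sort_cells_by_row cells results row_threshold out) := by unfold Spec_group_and_sort_cells_by_row; infer_instance

-- ===== CLAIM (what is proved, stated in full; the proofs are below) =====
def Claim_equal_group_and_sort_cells_by_row : Prop := ∀ (cells : List (Int × Int × Int × Int)) (results : List String) (row_threshold : Int), Dom_group_and_sort_cells_by_row cells results row_threshold → Spec_group_and_sort_cells_by_row cells results row_threshold (group_and_sort_cells_by_row cells results row_threshold)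

-- ===== LEMMAS AND PROOFS =====

-- A's finalize step
def pvFin (s : List (List PvCell) × List PvCell) : List (List PvCell) :=
  if s.2 = [] then s.1 else s.1 ++ [s.2]

-- how a pending current row `cur` (with last y = p) merges into B's grouping of the rest
def pvAttach (thr p : Int) (cur : List PvCell) (G : List (List PvCell)) : List (List PvCell) :=
  match G with
  | [] => [cur]
  | [] :: gs => cur :: [] :: gs
  | (b :: g) :: gs =>
      if |b.1.2.1 - p| < thr then (cur ++ b :: g) :: gs else cur :: (b :: g) :: gs

theorem pvAttach_step (thr p : Int) (cur : List PvCell) (a : PvCell) (G : List (List PvCell)) :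
    pvAttach thr p cur (pvStepB thr a G) =
      if |a.1.2.1 - p| < thr then pvAttach thr a.1.2.1 (cur ++ [a]) G
      else cur :: pvAttach thr a.1.2.1 [a] G := by
  rcases G with _ | ⟨_ | ⟨b, g⟩, gs⟩ <;>
    simp only [pvStepB, pvAttach] <;> split_ifs <;>
    simp_all [List.append_assoc]

theorem pvAttach_single (thr : Int) (a : PvCell) (G : List (List PvCell)) :
    pvAttach thr a.1.2.1 [a] G = pvStepB thr a G := by
  rcases G with _ | ⟨_ | ⟨b, g⟩, gs⟩ <;> simp only [pvStepB, pvAttach] <;> split_ifs <;> simp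

theorem pvInv (thr : Int) (l : List PvCell) :
    ∀ (rows : List (List PvCell)) (cur : List PvCell) (p : PvCell),
      cur.getLast? = some p →
      pvFin (l.foldl (pvStepA thr) (rows, cur)) =
        rows ++ pvAttach thr p.1.2.1 cur (l.foldr (pvStepB thr) []) := by
  induction l with
  | nil =>
      intro rows cur p hp
      have hne : cur ≠ [] := by intro h; simp [h] at hp
      simp [pvFin, pvAttach, hne]
  | cons a t ih =>
      intro rows cur p hp
      have hstep : pvStepA thr (rows, cur) a =
          if |a.1.2.1 - p.1.2.1| < thr then (rows, cur ++ [a]) else (rows ++ [cur], [a]) := by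
        simp [pvStepA, hp]
      rw [List.foldl_cons, hstep, List.foldr_cons, pvAttach_step]
      split_ifs with h
      · rw [ih rows (cur ++ [a]) a (by simp)]
      · rw [ih (rows ++ [cur]) [a] a (by simp), pvAttach_single, List.append_assoc]
        rfl

-- ===== VERDICT (by name: the statement is the Claim_ definition above) =====
theorem group_and_sort_cells_by_row_spec : Claim_equal_group_and_sort_cells_by_row := by
  intro cells results thr _
  unfold Spec_group_and_sort_cells_by_row group_and_sort_cells_by_row group_and_sort_cells_by_row_alt
  simp only [List.foldl_reverse]
  have he : (fun (x : PvCell) (y : List (List PvCell)) =>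
      (fun rows item => pvStepB thr item rows) y x) = pvStepB thr := by
    funext a b; rfl
  rw [he]
  congr 1
  generalize PySem.List.sorted2 (cells.zip results) (fun c => c.1.2.1) (fun c => c.1.1) = s
  cases s with
  | nil => simp
  | cons a t =>
      have h1 : pvStepA thr ([], []) a = ([], [a]) := by simp [pvStepA]
      have h2 := pvInv thr t [] [a] a (by simp)
      simp only [pvFin, List.nil_append] at h2
      rw [List.foldl_cons, h1, List.foldr_cons, ← pvAttach_single thr a, ← h2]
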